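-- pv_equiv track=rewrite | github.com/krzysztof400/Compiler | tests/test_programs_runtime.py | _bits_lsb
-- ===== SOURCE A (Python) =====
-- def _bits_lsb(n: int) -> list[int]:
--     if n == 0:
--         return [0]
--     bits: list[int] = []
--     while True:
--         bits.append(n % 2)
--         n //= 2
--         if n == 0:
--             break
--     return bits
-- ===== SOURCE B (Python) =====
-- def _bits_lsb(n: int) -> list[int]:
--     if n == 0:
--         return [0]
--     return [(n >> i) & 1 for i in range(n.bit_length())]
-- ===== Notes on version B (the rewrite author's own statement) =====
-- stated objective: idiomatic
-- what changed: B measures the bit width once with bit_length and extracts each bit by position with a shift-and-mask comprehension, instead of A's repeated divide-by-2 loop with a break test.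
import Mathlib
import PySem

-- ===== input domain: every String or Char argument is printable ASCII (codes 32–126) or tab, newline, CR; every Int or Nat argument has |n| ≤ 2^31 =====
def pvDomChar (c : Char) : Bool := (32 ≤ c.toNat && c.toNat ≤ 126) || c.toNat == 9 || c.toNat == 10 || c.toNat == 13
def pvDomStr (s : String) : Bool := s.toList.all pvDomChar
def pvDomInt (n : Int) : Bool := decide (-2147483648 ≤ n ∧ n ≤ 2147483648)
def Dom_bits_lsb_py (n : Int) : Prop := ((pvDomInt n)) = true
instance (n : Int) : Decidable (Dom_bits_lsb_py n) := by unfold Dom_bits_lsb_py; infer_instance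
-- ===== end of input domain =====

-- B computes the bit width once (bit_length) and extracts bits by position with shift-and-mask,
-- instead of A's repeated divide-by-2 loop; equivalent on all n ≥ 0 (A loops forever on n < 0).


-- ===== PORT A =====
-- A's 'while True' body: append n % 2, n //= 2, break when n == 0.
-- The 'else []' branch on n < 0 is only a totality guard: there the Python loop never
-- terminates, and such inputs are excluded by Pre_bits_lsb_py.
def pvLoopA (n : Int) : List Int :=
  PySem.Int.mod n 2 ::
    (if PySem.Int.floordiv n 2 = 0 then []
     else if _h : 0 < n then pvLoopA (PySem.Int.floordiv n 2) else [])
termination_by n.toNat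
decreasing_by
  have : PySem.Int.floordiv n 2 = n / 2 := PySem.Int.floordiv_eq_ediv_of_pos (by omega)
  rw [this]; omega

def bits_lsb_py (n : Int) : List Int :=
  if n = 0 then [0] else pvLoopA n

-- ===== PORT B =====
def bits_lsb_py_alt (n : Int) : List Int :=
  if n = 0 then [0]
  else (List.range (PySem.Int.bitLength n)).map (fun i => (((n.toNat >>> i) &&& 1 : Nat) : Int))

-- ===== PRECONDITION & SPEC =====
-- Pre_ excludes n < 0, on which Python A loops forever (n //= 2 never reaches 0).
def Pre_bits_lsb_py (n : Int) : Prop := 0 ≤ n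
instance (n : Int) : Decidable (Pre_bits_lsb_py n) := by unfold Pre_bits_lsb_py; infer_instance
def pvWitness_bits_lsb_py : Int := (6)

def Spec_bits_lsb_py (n : Int) (out : List Int) : Prop := out = bits_lsb_py_alt n
instance (n : Int) (out : List Int) : Decidable (Spec_bits_lsb_py n out) := by unfold Spec_bits_lsb_py; infer_instance

-- ===== CLAIM (what is proved, stated in full; the proofs are below) =====
def Claim_equal_bits_lsb_py : Prop := ∀ (n : Int), Dom_bits_lsb_py n → Pre_bits_lsb_py n → Spec_bits_lsb_py n (bits_lsb_py n)

-- ===== LEMMAS AND PROOFS =====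

-- the positional-extraction list, over Nat
def pvBitsOf (m : Nat) : List Int :=
  (List.range (PySem.Int.bitLength (m : Int))).map (fun i => (((m >>> i) &&& 1 : Nat) : Int))

theorem pvLoopA_eq_bitsOf (m : Nat) (hm : 0 < m) : pvLoopA (m : Int) = pvBitsOf m := by
  induction m using Nat.strong_induction_on with
  | _ m ih =>
    rw [pvLoopA, pvBitsOf, PySem.Int.bitLength_natCast hm, List.range_succ_eq_map, List.map_cons,
        List.map_map]
    have hmod : PySem.Int.mod (m : Int) 2 = ((m % 2 : Nat) : Int) := by
      exact_mod_cast PySem.Int.mod_natCast m 2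
    have hdiv : PySem.Int.floordiv (m : Int) 2 = ((m / 2 : Nat) : Int) := by
      exact_mod_cast PySem.Int.floordiv_natCast m 2
    have hhead : (((m >>> 0) &&& 1 : Nat) : Int) = PySem.Int.mod (m : Int) 2 := by
      rw [hmod]; norm_num [Nat.and_one_is_mod]
    have htail : ∀ i : Nat, (m >>> (i + 1)) &&& 1 = (m / 2) >>> i &&& 1 := by
      intro i
      rw [show i + 1 = 1 + i by omega, Nat.shiftRight_add, Nat.shiftRight_one]
    rw [hhead, hdiv]
    by_cases h0 : (m / 2 : Nat) = 0
    · have : m = 1 := by omega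
      subst this; decide
    · have hpos : (0:Int) < (m : Int) := by exact_mod_cast hm
      rw [if_neg (by exact_mod_cast h0), dif_pos hpos,
          ih (m / 2) (by omega) (by omega), pvBitsOf]
      congr 1
      apply List.map_congr_left
      intro i _
      simp [Function.comp, htail i]

-- ===== VERDICT (by name: the statement is the Claim_ definition above) =====
theorem bits_lsb_py_spec : Claim_equal_bits_lsb_py := by
  intro n _ hpre
  unfold Spec_bits_lsb_py bits_lsb_py bits_lsb_py_alt
  by_cases h : n = 0
  · simp [h]
  · rw [if_neg h, if_neg h]
    obtain ⟨m, rfl⟩ := Int.eq_ofNat_of_zero_le hpre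
    have hm : 0 < m := by omega
    rw [pvLoopA_eq_bitsOf m hm, pvBitsOf]
    simp
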